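-- pv_equiv track=rewrite | github.com/maxcohen31/Codewars-Solutions | Codewars/Numbers_to_Letters_7_kyu.py | switcher
-- ===== SOURCE A (Python) =====
-- from string import ascii_lowercase
--
-- def switcher(arr: list[str]) -> str:
--     result = ""
--     reversed_alpha = f"{ascii_lowercase[::-1]}!? "
--     number_range = list(range(1, 30))
--     new_dict = dict(zip(reversed_alpha, number_range))
--
--     for n in arr:
--         for k,v in new_dict.items():
--             if n == str(v):
--                 result += k
--     return result
-- ===== SOURCE B (Python) =====
-- from string import ascii_lowercase
--
-- def switcher(arr: list[str]) -> str:
--     letters = ascii_lowercase[::-1] + "!? "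
--     valid = {str(i) for i in range(1, 30)}
--     return "".join(letters[int(n) - 1] for n in arr if n in valid)
-- ===== Notes on version B (the rewrite author's own statement) =====
-- stated objective: idiomatic
-- what changed: Replaces the char->number dict and the 29-entry inner scan per token with a membership set of the valid tokens '1'..'29' and direct positional indexing into the reversed-alphabet string, assembled with a single join comprehension.
import Mathlib
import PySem

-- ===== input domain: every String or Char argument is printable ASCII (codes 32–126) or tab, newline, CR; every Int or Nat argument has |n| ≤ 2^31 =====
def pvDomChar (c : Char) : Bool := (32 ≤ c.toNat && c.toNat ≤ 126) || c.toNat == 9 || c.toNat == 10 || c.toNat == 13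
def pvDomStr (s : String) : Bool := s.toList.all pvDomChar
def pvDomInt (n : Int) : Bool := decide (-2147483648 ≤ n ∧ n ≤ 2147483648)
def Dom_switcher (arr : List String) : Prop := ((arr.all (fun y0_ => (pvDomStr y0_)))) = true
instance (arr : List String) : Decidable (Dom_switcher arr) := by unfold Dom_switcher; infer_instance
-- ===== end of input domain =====

-- B replaces the char→number dict and its 29-entry inner scan per token with a set of
-- the valid tokens '1'..'29' and direct positional indexing into the reversed alphabet
-- string (more idiomatic, no inner loop).

-- ===== PORT A =====
def switcher (arr : List String) : String :=
  let reversed_alpha : List Char :=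
    ((PySem.List.slice? "abcdefghijklmnopqrstuvwxyz".toList none none (-1)).getD []) ++ "!? ".toList
  let number_range : List Int := PySem.List.pyRange 1 30 1
  let new_dict : List (Char × Int) := reversed_alpha.zip number_range
  String.ofList (arr.foldl (fun result n =>
    new_dict.foldl (fun result kv =>
      if n = PySem.Int.toStr kv.2 then result ++ [kv.1] else result) result) [])

-- ===== PORT B =====
def switcher_alt (arr : List String) : String :=
  let letters : List Char :=
    ((PySem.List.slice? "abcdefghijklmnopqrstuvwxyz".toList none none (-1)).getD []) ++ "!? ".toList
  let valid : PySem.Set String := PySem.Set.ofList ((PySem.List.pyRange 1 30 1).map PySem.Int.toStr)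
  String.ofList ((arr.filter (fun n => valid.contains n)).map (fun n =>
    (PySem.List.pyGet? letters ((PySem.Int.ofStr? n).getD 0 - 1)).getD ' '))

-- ===== PRECONDITION & SPEC =====
def Spec_switcher (arr : List String) (out : String) : Prop := out = switcher_alt arr
instance (arr : List String) (out : String) : Decidable (Spec_switcher arr out) := by unfold Spec_switcher; infer_instance

-- ===== CLAIM (what is proved, stated in full; the proofs are below) =====
def Claim_equal_switcher : Prop := ∀ (arr : List String), Dom_switcher arr → Spec_switcher arr (switcher arr)

-- ===== LEMMAS AND PROOFS =====

-- the shared letter table and A's dict, as proof-side abbreviations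
def pvLetters : List Char :=
  ((PySem.List.slice? "abcdefghijklmnopqrstuvwxyz".toList none none (-1)).getD []) ++ "!? ".toList

def pvDict : List (Char × Int) := pvLetters.zip (PySem.List.pyRange 1 30 1)

def pvValid : PySem.Set String := PySem.Set.ofList ((PySem.List.pyRange 1 30 1).map PySem.Int.toStr)

def pvPick (n : String) : Char :=
  (PySem.List.pyGet? pvLetters ((PySem.Int.ofStr? n).getD 0 - 1)).getD ' '

-- per-token: A's inner 29-entry scan equals B's guarded direct lookup
lemma pv_inner_eq (n : String) :
    (pvDict.filter (fun kv => n = PySem.Int.toStr kv.2)).map Prod.fst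
      = (if pvValid.contains n then [pvPick n] else []) := by
  have ev : pvValid = (["1", "2", "3", "4", "5", "6", "7", "8", "9", "10", "11", "12", "13", "14", "15", "16", "17", "18", "19", "20", "21", "22", "23", "24", "25", "26", "27", "28", "29"] : List String) := by decide
  have ed : pvDict = ([('z', (1:Int)), ('y', 2), ('x', 3), ('w', 4), ('v', 5), ('u', 6), ('t', 7), ('s', 8), ('r', 9), ('q', 10), ('p', 11), ('o', 12), ('n', 13), ('m', 14), ('l', 15), ('k', 16), ('j', 17), ('i', 18), ('h', 19), ('g', 20), ('f', 21), ('e', 22), ('d', 23), ('c', 24), ('b', 25), ('a', 26), ('!', 27), ('?', 28), (' ', 29)] : List (Char × Int)) := by decide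
  by_cases hv : pvValid.contains n = true
  · have hm : n ∈ (["1", "2", "3", "4", "5", "6", "7", "8", "9", "10", "11", "12", "13", "14", "15", "16", "17", "18", "19", "20", "21", "22", "23", "24", "25", "26", "27", "28", "29"] : List String) := by
      rw [ev] at hv
      simpa [List.contains_iff_mem] using hv
    rw [hv, ed]
    fin_cases hm <;> decide
  · rw [if_neg (by simpa using hv)]
    rw [List.filter_eq_nil_iff.mpr]
    · rfl
    · intro kv hkv
      simp only [decide_eq_true_eq]
      intro heq
      apply hv
      rw [ed] at hkv
      subst heq
      fin_cases hkv <;> decide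

lemma pv_flatMap_ite (c : String → Bool) (f : String → Char) (l : List String) :
    l.flatMap (fun n => if c n then [f n] else []) = (l.filter c).map f := by
  induction l with
  | nil => rfl
  | cons x t ih =>
    by_cases h : c x = true <;> simp [List.flatMap_cons, h, ih]

-- ===== VERDICT (by name: the statement is the Claim_ definition above) =====
theorem switcher_spec : Claim_equal_switcher := by
  intro arr _
  unfold Spec_switcher switcher switcher_alt
  simp only []
  congr 1
  have h1 : ∀ (res : List Char) (n : String),
      pvDict.foldl (fun r kv => if n = PySem.Int.toStr kv.2 then r ++ [kv.1] else r) res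
        = res ++ (if pvValid.contains n then [pvPick n] else []) := by
    intro res n
    rw [show (fun (r : List Char) (kv : Char × Int) =>
          if n = PySem.Int.toStr kv.2 then r ++ [kv.1] else r)
        = (fun (r : List Char) (kv : Char × Int) =>
          if decide (n = PySem.Int.toStr kv.2) then r ++ [kv.1] else r) from by
      funext r kv; simp]
    rw [PySem.List.foldl_append_if]
    rw [pv_inner_eq]
  calc arr.foldl (fun result n =>
        (pvLetters.zip (PySem.List.pyRange 1 30 1)).foldl
          (fun result kv => if n = PySem.Int.toStr kv.2 then result ++ [kv.1] else result) result) []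
      = arr.foldl (fun res n => res ++ (if pvValid.contains n then [pvPick n] else [])) [] := by
        apply PySem.List.foldl_congr_mem
        intro acc x _
        exact h1 acc x
    _ = [] ++ arr.flatMap (fun n => if pvValid.contains n then [pvPick n] else []) :=
        PySem.List.foldl_append_eq_flatMap _ _ _
    _ = (arr.filter (fun n => pvValid.contains n)).map pvPick := by
        rw [List.nil_append, pv_flatMap_ite]
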